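-- pv_equiv track=rewrite | github.com/jcolinpatrick/kryptos | scripts/e_roman_04b_abscissa_coords.py | fill_3d_grid_keyword
-- ===== SOURCE A (Python) =====
-- def keyword_order(keyword_vals, dim_size):
--     """Column-ordering permutation from keyword values (cycling as needed)."""
--     assignments = [(keyword_vals[i % len(keyword_vals)], i) for i in range(dim_size)]
--     assignments.sort()
--     return [pos for _, pos in assignments]
--
-- def fill_3d_grid_keyword(text, d1, d2, d3, kv1, kv2, kv3, pad_char='X'):
--     """Fill using keyword-derived orderings along each dimension."""
--     total = d1 * d2 * d3
--     padded = text + pad_char * (total - len(text))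
--     order1 = keyword_order(kv1, d1)
--     order2 = keyword_order(kv2, d2)
--     order3 = keyword_order(kv3, d3)
--     grid = [[[' ' for _ in range(d3)] for _ in range(d2)] for _ in range(d1)]
--     idx = 0
--     for i in order1:
--         for j in order2:
--             for k in order3:
--                 grid[i][j][k] = padded[idx]
--                 idx += 1
--     return grid
-- ===== SOURCE B (Python) =====
-- def keyword_order(keyword_vals, dim_size):
--     """Column-ordering permutation from keyword values (cycling as needed)."""
--     assignments = [(keyword_vals[i % len(keyword_vals)], i) for i in range(dim_size)]
--     assignments.sort()
--     return [pos for _, pos in assignments]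
--
-- def fill_3d_grid_keyword(text, d1, d2, d3, kv1, kv2, kv3, pad_char='X'):
--     """Fill using keyword-derived orderings along each dimension.
--
--     Instead of walking the cells in permuted order with a running counter,
--     build inverse-rank tables (rank[i] = position of cell index i in the
--     keyword order) and compute each cell's source index directly."""
--     total = d1 * d2 * d3
--     padded = text + pad_char * (total - len(text))
--     def ranks(kv, d):
--         r = [0] * d
--         for pos, i in enumerate(keyword_order(kv, d)):
--             r[i] = pos
--         return r
--     r1, r2, r3 = ranks(kv1, d1), ranks(kv2, d2), ranks(kv3, d3)
--     return [[[padded[r1[i] * d2 * d3 + r2[j] * d3 + r3[k]]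
--               for k in range(d3)]
--              for j in range(d2)]
--             for i in range(d1)]
-- ===== Notes on version B (the rewrite author's own statement) =====
-- stated objective: alternative
-- what changed: B precomputes inverse-rank tables from the keyword orders and fills the grid in natural (i,j,k) order, computing each cell's source index arithmetically, instead of A's walk over cells in permuted order with a running counter and in-place assignment.
import Mathlib
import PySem

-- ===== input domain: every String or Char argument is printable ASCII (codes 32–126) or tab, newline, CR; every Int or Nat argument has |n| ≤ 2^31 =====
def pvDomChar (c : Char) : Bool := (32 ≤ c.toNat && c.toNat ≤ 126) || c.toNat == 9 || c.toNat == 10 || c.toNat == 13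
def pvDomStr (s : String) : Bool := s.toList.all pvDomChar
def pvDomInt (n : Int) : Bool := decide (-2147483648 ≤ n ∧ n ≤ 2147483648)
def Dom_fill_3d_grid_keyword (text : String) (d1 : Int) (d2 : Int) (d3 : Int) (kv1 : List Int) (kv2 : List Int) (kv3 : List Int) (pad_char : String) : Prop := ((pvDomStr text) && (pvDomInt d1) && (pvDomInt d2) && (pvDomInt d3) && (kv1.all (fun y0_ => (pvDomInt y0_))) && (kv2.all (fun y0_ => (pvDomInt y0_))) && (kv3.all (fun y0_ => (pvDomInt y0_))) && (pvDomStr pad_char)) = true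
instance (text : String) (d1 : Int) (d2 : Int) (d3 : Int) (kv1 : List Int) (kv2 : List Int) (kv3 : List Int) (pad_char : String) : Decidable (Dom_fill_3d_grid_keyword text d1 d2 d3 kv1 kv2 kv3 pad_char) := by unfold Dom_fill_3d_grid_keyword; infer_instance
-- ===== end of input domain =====

-- B fills the grid in natural (i,j,k) order from precomputed inverse-rank tables instead of
-- walking the cells in keyword-permuted order with a running counter (objective: alternative).


-- ===== PORT A =====
-- keyword_order: shared helper (identical source text in Source A and Source B)
def keyword_order (keyword_vals : List Int) (dim_size : Int) : List Int :=
  let assignments := (PySem.List.pyRange 0 dim_size 1).map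
    (fun i => (PySem.List.pyGetD keyword_vals (PySem.Int.mod i (keyword_vals.length : Int)) 0, i))
  let assignments := PySem.List.sorted2 assignments (fun p => p.1) (fun p => p.2)
  assignments.map (fun p => p.2)

-- padded[idx] as a one-character string; in range on every input Pre_ admits
def pvPadAt (padded : List Char) (idx : Int) : String :=
  String.ofList [PySem.List.pyGetD padded idx ' ']

def fill_3d_grid_keyword (text : String) (d1 : Int) (d2 : Int) (d3 : Int) (kv1 : List Int) (kv2 : List Int) (kv3 : List Int) (pad_char : String) : List (List (List String)) :=
  let total := d1 * d2 * d3
  let padded : List Char := text.toList ++ PySem.List.pyRepeat pad_char.toList (total - (text.toList.length : Int))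
  let order1 := keyword_order kv1 d1
  let order2 := keyword_order kv2 d2
  let order3 := keyword_order kv3 d3
  let grid : List (List (List String)) :=
    (PySem.List.pyRange 0 d1 1).map (fun _ =>
      (PySem.List.pyRange 0 d2 1).map (fun _ =>
        (PySem.List.pyRange 0 d3 1).map (fun _ => " ")))
  let res := order1.foldl (fun (s : List (List (List String)) × Int) i =>
    order2.foldl (fun (s : List (List (List String)) × Int) j =>
      order3.foldl (fun (s : List (List (List String)) × Int) k =>
        (PySem.List.pySetD s.1 i
          (PySem.List.pySetD (PySem.List.pyGetD s.1 i []) j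
            (PySem.List.pySetD (PySem.List.pyGetD (PySem.List.pyGetD s.1 i []) j []) k
              (pvPadAt padded s.2))),
         s.2 + 1)) s) s) (grid, 0)
  res.1

-- ===== PORT B =====
-- ranks kv d: r[i] = position of i in keyword_order kv d
def pvRanks (kv : List Int) (d : Int) : List Int :=
  let r := PySem.List.pyRepeat [(0 : Int)] d
  (PySem.List.enumerate (keyword_order kv d) 0).foldl
    (fun r pi => PySem.List.pySetD r pi.2 pi.1) r

def fill_3d_grid_keyword_alt (text : String) (d1 : Int) (d2 : Int) (d3 : Int) (kv1 : List Int) (kv2 : List Int) (kv3 : List Int) (pad_char : String) : List (List (List String)) :=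
  let total := d1 * d2 * d3
  let padded : List Char := text.toList ++ PySem.List.pyRepeat pad_char.toList (total - (text.toList.length : Int))
  let r1 := pvRanks kv1 d1
  let r2 := pvRanks kv2 d2
  let r3 := pvRanks kv3 d3
  (PySem.List.pyRange 0 d1 1).map (fun i =>
    (PySem.List.pyRange 0 d2 1).map (fun j =>
      (PySem.List.pyRange 0 d3 1).map (fun k =>
        pvPadAt padded
          (PySem.List.pyGetD r1 i 0 * d2 * d3 + PySem.List.pyGetD r2 j 0 * d3 + PySem.List.pyGetD r3 k 0))))

-- ===== PRECONDITION & SPEC =====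
-- Pre_ excludes exactly the inputs on which Python A raises: ZeroDivisionError when a
-- dimension is positive but its keyword list is empty; IndexError when all dimensions are
-- positive, the text is shorter than the grid and pad_char is the empty string; and
-- OverflowError when the pad repetition count, or the repeated-string length, exceeds
-- CPython's index bound 2^63 - 1.
def Pre_fill_3d_grid_keyword (text : String) (d1 : Int) (d2 : Int) (d3 : Int) (kv1 : List Int) (kv2 : List Int) (kv3 : List Int) (pad_char : String) : Prop :=
  (0 < d1 → kv1 ≠ []) ∧ (0 < d2 → kv2 ≠ []) ∧ (0 < d3 → kv3 ≠ []) ∧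
  (0 < d1 → 0 < d2 → 0 < d3 → (text.toList.length : Int) < d1 * d2 * d3 → pad_char ≠ "") ∧
  (0 < d1 * d2 * d3 - (text.toList.length : Int) →
    d1 * d2 * d3 - (text.toList.length : Int) ≤ 9223372036854775807 ∧
    (pad_char.toList.length : Int) * (d1 * d2 * d3 - (text.toList.length : Int)) ≤ 9223372036854775807)
instance (text : String) (d1 : Int) (d2 : Int) (d3 : Int) (kv1 : List Int) (kv2 : List Int) (kv3 : List Int) (pad_char : String) : Decidable (Pre_fill_3d_grid_keyword text d1 d2 d3 kv1 kv2 kv3 pad_char) := by unfold Pre_fill_3d_grid_keyword; infer_instance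
def pvWitness_fill_3d_grid_keyword : String × Int × Int × Int × List Int × List Int × List Int × String :=
  ("HELLO", 2, 2, 2, [2, 1], [1, 3], [5], "X")
def Spec_fill_3d_grid_keyword (text : String) (d1 : Int) (d2 : Int) (d3 : Int) (kv1 : List Int) (kv2 : List Int) (kv3 : List Int) (pad_char : String) (out : List (List (List String))) : Prop := out = fill_3d_grid_keyword_alt text d1 d2 d3 kv1 kv2 kv3 pad_char
instance (text : String) (d1 : Int) (d2 : Int) (d3 : Int) (kv1 : List Int) (kv2 : List Int) (kv3 : List Int) (pad_char : String) (out : List (List (List String))) : Decidable (Spec_fill_3d_grid_keyword text d1 d2 d3 kv1 kv2 kv3 pad_char out) := by unfold Spec_fill_3d_grid_keyword; infer_instance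

-- ===== CLAIM (what is proved, stated in full; the proofs are below) =====
def Claim_equal_fill_3d_grid_keyword : Prop := ∀ (text : String) (d1 : Int) (d2 : Int) (d3 : Int) (kv1 : List Int) (kv2 : List Int) (kv3 : List Int) (pad_char : String), Dom_fill_3d_grid_keyword text d1 d2 d3 kv1 kv2 kv3 pad_char → Pre_fill_3d_grid_keyword text d1 d2 d3 kv1 kv2 kv3 pad_char → Spec_fill_3d_grid_keyword text d1 d2 d3 kv1 kv2 kv3 pad_char (fill_3d_grid_keyword text d1 d2 d3 kv1 kv2 kv3 pad_char)

-- ===== LEMMAS AND PROOFS =====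

-- proof-side helpers: the three loop bodies of port A with the state localized to the
-- sub-structure they actually modify
def pvRowStep (padded : List Char) : (List String × Int) → Int → (List String × Int) :=
  fun u k => (PySem.List.pySetD u.1 k (pvPadAt padded u.2), u.2 + 1)

def pvPlaneStep (padded : List Char) (ord3 : List Int) :
    (List (List String) × Int) → Int → (List (List String) × Int) :=
  fun t j =>
    ((PySem.List.pySetD t.1 j
        (ord3.foldl (pvRowStep padded) (PySem.List.pyGetD t.1 j [], t.2)).1),
     (ord3.foldl (pvRowStep padded) (PySem.List.pyGetD t.1 j [], t.2)).2)

def pvGridStep (padded : List Char) (ord2 ord3 : List Int) :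
    (List (List (List String)) × Int) → Int → (List (List (List String)) × Int) :=
  fun s i =>
    ((PySem.List.pySetD s.1 i
        (ord2.foldl (pvPlaneStep padded ord3) (PySem.List.pyGetD s.1 i [], s.2)).1),
     (ord2.foldl (pvPlaneStep padded ord3) (PySem.List.pyGetD s.1 i [], s.2)).2)

lemma pvRowFold_snd (padded : List Char) (ord : List Int) (row : List String) (n : Int) :
    (ord.foldl (pvRowStep padded) (row, n)).2 = n + ord.length := by
  induction ord generalizing row n with
  | nil => simp
  | cons k rest ih =>
    simp only [List.foldl_cons, pvRowStep, List.length_cons]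
    rw [ih]; push_cast; ring

lemma pvPlaneFold_snd (padded : List Char) (ord2 ord3 : List Int) (p : List (List String)) (n : Int) :
    (ord2.foldl (pvPlaneStep padded ord3) (p, n)).2 = n + ord2.length * ord3.length := by
  induction ord2 generalizing p n with
  | nil => simp
  | cons j rest ih =>
    simp only [List.foldl_cons, pvPlaneStep, List.length_cons]
    rw [pvRowFold_snd, ih]; push_cast; ring

lemma pvPlaneFold_length (padded : List Char) (ord2 ord3 : List Int) (p : List (List String)) (n : Int) :
    (ord2.foldl (pvPlaneStep padded ord3) (p, n)).1.length = p.length := by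
  induction ord2 generalizing p n with
  | nil => rfl
  | cons j rest ih =>
    simp only [List.foldl_cons, pvPlaneStep]
    rw [ih, PySem.List.length_pySetD]

-- localization: a fold whose body only rewrites position i of the list is the same list
-- with position i replaced by the fold on that entry alone
lemma pv_loc {α β : Type} (dflt : α) (h : α → Int → β → α × Int) (i : Int)
    (ord : List β) (g : List α) (n : Int) (hi0 : 0 ≤ i) (hil : i.toNat < g.length) :
    ord.foldl (fun (s : List α × Int) k =>
        (PySem.List.pySetD s.1 i (h (PySem.List.pyGetD s.1 i dflt) s.2 k).1,
         (h (PySem.List.pyGetD s.1 i dflt) s.2 k).2)) (g, n)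
    = ((PySem.List.pySetD g i
          (ord.foldl (fun (t : α × Int) k => h t.1 t.2 k) (PySem.List.pyGetD g i dflt, n)).1),
       (ord.foldl (fun (t : α × Int) k => h t.1 t.2 k) (PySem.List.pyGetD g i dflt, n)).2) := by
  induction ord generalizing g n with
  | nil =>
    simp only [List.foldl_nil]
    rw [PySem.List.pySetD_of_nonneg _ _ hi0,
        PySem.List.pyGetD_eq_getElem _ _ hi0 (by omega), List.set_getElem_self]
  | cons k rest ih =>
    simp only [List.foldl_cons]
    rw [ih (PySem.List.pySetD g i (h (PySem.List.pyGetD g i dflt) n k).1)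
          (h (PySem.List.pyGetD g i dflt) n k).2
          (by rw [PySem.List.length_pySetD]; exact hil)]
    have hget : PySem.List.pyGetD (PySem.List.pySetD g i (h (PySem.List.pyGetD g i dflt) n k).1) i dflt
        = (h (PySem.List.pyGetD g i dflt) n k).1 := by
      rw [PySem.List.pySetD_of_nonneg _ _ hi0,
          PySem.List.pyGetD_eq_getElem _ _ hi0 (by simp; omega), List.getElem_set_self]
    rw [hget, PySem.List.pySetD_of_nonneg _ _ hi0, PySem.List.pySetD_of_nonneg _ _ hi0,
        PySem.List.pySetD_of_nonneg _ _ hi0, List.set_set]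

-- the literal innermost loop of port A, localized to row [i][j]
lemma pv_inner3 (padded : List Char) (ord3 : List Int) (i j : Int)
    (g : List (List (List String))) (n : Int)
    (hi0 : 0 ≤ i) (hil : i.toNat < g.length)
    (hj0 : 0 ≤ j) (hjl : j.toNat < (PySem.List.pyGetD g i ([] : List (List String))).length) :
    ord3.foldl (fun (s : List (List (List String)) × Int) k =>
        (PySem.List.pySetD s.1 i
          (PySem.List.pySetD (PySem.List.pyGetD s.1 i []) j
            (PySem.List.pySetD (PySem.List.pyGetD (PySem.List.pyGetD s.1 i []) j []) k
              (pvPadAt padded s.2))),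
         s.2 + 1)) (g, n)
    = ((PySem.List.pySetD g i
          (PySem.List.pySetD (PySem.List.pyGetD g i []) j
            (ord3.foldl (pvRowStep padded)
              (PySem.List.pyGetD (PySem.List.pyGetD g i []) j [], n)).1)),
       (ord3.foldl (pvRowStep padded)
          (PySem.List.pyGetD (PySem.List.pyGetD g i []) j [], n)).2) := by
  have h1 := pv_loc ([] : List (List String))
      (fun a m k => (PySem.List.pySetD a j
          (PySem.List.pySetD (PySem.List.pyGetD a j []) k (pvPadAt padded m)), m + 1))
      i ord3 g n hi0 hil
  have h2 := pv_loc ([] : List String)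
      (fun a m k => (PySem.List.pySetD a k (pvPadAt padded m), m + 1))
      j ord3 (PySem.List.pyGetD g i []) n hj0 hjl
  rw [h1, h2]
  rfl

-- the literal middle loop of port A, localized to plane [i]
lemma pv_level2 (padded : List Char) (ord2 ord3 : List Int) (i : Int)
    (g : List (List (List String))) (n : Int)
    (hi0 : 0 ≤ i) (hil : i.toNat < g.length)
    (hj : ∀ j ∈ ord2, 0 ≤ j ∧ j.toNat < (PySem.List.pyGetD g i ([] : List (List String))).length) :
    ord2.foldl (fun (s : List (List (List String)) × Int) j =>
      ord3.foldl (fun (s : List (List (List String)) × Int) k =>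
        (PySem.List.pySetD s.1 i
          (PySem.List.pySetD (PySem.List.pyGetD s.1 i []) j
            (PySem.List.pySetD (PySem.List.pyGetD (PySem.List.pyGetD s.1 i []) j []) k
              (pvPadAt padded s.2))),
         s.2 + 1)) s) (g, n)
    = ((PySem.List.pySetD g i
          (ord2.foldl (pvPlaneStep padded ord3) (PySem.List.pyGetD g i [], n)).1),
       (ord2.foldl (pvPlaneStep padded ord3) (PySem.List.pyGetD g i [], n)).2) := by
  induction ord2 generalizing g n with
  | nil =>
    simp only [List.foldl_nil]
    rw [PySem.List.pySetD_of_nonneg _ _ hi0,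
        PySem.List.pyGetD_eq_getElem _ _ hi0 (by omega), List.set_getElem_self]
  | cons j rest ih =>
    obtain ⟨hj0, hjl⟩ := hj j (by simp)
    simp only [List.foldl_cons]
    rw [pv_inner3 padded ord3 i j g n hi0 hil hj0 hjl]
    have hget : PySem.List.pyGetD (PySem.List.pySetD g i
          (PySem.List.pySetD (PySem.List.pyGetD g i []) j
            (ord3.foldl (pvRowStep padded)
              (PySem.List.pyGetD (PySem.List.pyGetD g i []) j [], n)).1)) i
          ([] : List (List String))
        = PySem.List.pySetD (PySem.List.pyGetD g i []) j
            (ord3.foldl (pvRowStep padded)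
              (PySem.List.pyGetD (PySem.List.pyGetD g i []) j [], n)).1 := by
      rw [PySem.List.pySetD_of_nonneg _ _ hi0,
          PySem.List.pyGetD_eq_getElem _ _ hi0 (by simp; omega), List.getElem_set_self]
    rw [ih _ _ (by rw [PySem.List.length_pySetD]; exact hil)
          (by intro j' hj'; rw [hget, PySem.List.length_pySetD]; exact hj j' (by simp [hj']))]
    rw [hget, PySem.List.pySetD_of_nonneg _ _ hi0, PySem.List.pySetD_of_nonneg _ _ hi0,
        PySem.List.pySetD_of_nonneg _ _ hi0, List.set_set]
    rfl

-- the whole triple loop of port A is the fold of pvGridStep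
lemma pv_level1 (padded : List Char) (ord1 ord2 ord3 : List Int)
    (g : List (List (List String))) (n : Int)
    (hi : ∀ i ∈ ord1, 0 ≤ i ∧ i.toNat < g.length)
    (hrow : ∀ p ∈ g, ∀ j ∈ ord2, 0 ≤ j ∧ j.toNat < p.length) :
    ord1.foldl (fun (s : List (List (List String)) × Int) i =>
      ord2.foldl (fun (s : List (List (List String)) × Int) j =>
        ord3.foldl (fun (s : List (List (List String)) × Int) k =>
          (PySem.List.pySetD s.1 i
            (PySem.List.pySetD (PySem.List.pyGetD s.1 i []) j
              (PySem.List.pySetD (PySem.List.pyGetD (PySem.List.pyGetD s.1 i []) j []) k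
                (pvPadAt padded s.2))),
           s.2 + 1)) s) s) (g, n)
    = ord1.foldl (pvGridStep padded ord2 ord3) (g, n) := by
  induction ord1 generalizing g n with
  | nil => rfl
  | cons i rest ih =>
    obtain ⟨hi0, hil⟩ := hi i (by simp)
    have hgmem : PySem.List.pyGetD g i ([] : List (List String)) ∈ g := by
      rw [PySem.List.pyGetD_eq_getElem _ _ hi0 (by omega)]
      exact List.getElem_mem _
    simp only [List.foldl_cons]
    rw [pv_level2 padded ord2 ord3 i g n hi0 hil (hrow _ hgmem)]
    rw [ih _ _ (by intro i' hi'; rw [PySem.List.length_pySetD]; exact hi i' (by simp [hi']))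
          (by
            intro p hp j hj
            rw [PySem.List.pySetD_of_nonneg _ _ hi0] at hp
            rcases List.mem_or_eq_of_mem_set hp with hp | hp
            · exact hrow p hp j hj
            · subst hp
              rw [pvPlaneFold_length]
              exact hrow _ hgmem j hj)]
    rfl

-- element characterization of the row fold
lemma pv_row_char (padded : List Char) (ord : List Int) (row : List String) (n : Int)
    (hb : ∀ k ∈ ord, 0 ≤ k ∧ k.toNat < row.length) (hnd : ord.Nodup) (m : Nat) :
    (ord.foldl (pvRowStep padded) (row, n)).1[m]? =
      if (m : Int) ∈ ord then some (pvPadAt padded (n + ord.idxOf (m : Int))) else row[m]? := by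
  induction ord generalizing row n with
  | nil => simp
  | cons k rest ih =>
    obtain ⟨hk0, hkl⟩ := hb k (by simp)
    have hknr : k ∉ rest := (List.nodup_cons.mp hnd).1
    simp only [List.foldl_cons, pvRowStep]
    rw [PySem.List.pySetD_of_nonneg _ _ hk0]
    rw [ih _ _ (by intro k' hk'; rw [List.length_set]; exact hb k' (by simp [hk']))
          (List.nodup_cons.mp hnd).2]
    by_cases hmr : (m : Int) ∈ rest
    · have hmk : (m : Int) ≠ k := fun h => hknr (h ▸ hmr)
      rw [if_pos hmr, if_pos (by simp [hmr])]
      rw [List.idxOf_cons_ne _ (by exact fun h => hmk h.symm)]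
      push_cast; ring_nf
    · by_cases hmk : (m : Int) = k
      · rw [if_neg hmr, if_pos (by simp [hmk])]
        have hm : m = k.toNat := by omega
        subst hm
        rw [List.getElem?_set_self (by omega), hmk, List.idxOf_cons_self]
        simp
      · rw [if_neg hmr, if_neg (by simp [hmk, hmr])]
        rw [List.getElem?_set_ne (by omega)]

-- element characterization of the plane fold
lemma pv_plane_char (padded : List Char) (ord2 ord3 : List Int) (p : List (List String)) (n : Int)
    (hb : ∀ j ∈ ord2, 0 ≤ j ∧ j.toNat < p.length) (hnd : ord2.Nodup) (m : Nat) :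
    (ord2.foldl (pvPlaneStep padded ord3) (p, n)).1[m]? =
      if (m : Int) ∈ ord2 then
        some (ord3.foldl (pvRowStep padded)
          (PySem.List.pyGetD p (m : Int) [], n + ord2.idxOf (m : Int) * ord3.length)).1
      else p[m]? := by
  induction ord2 generalizing p n with
  | nil => simp
  | cons j rest ih =>
    obtain ⟨hj0, hjl⟩ := hb j (by simp)
    have hjnr : j ∉ rest := (List.nodup_cons.mp hnd).1
    simp only [List.foldl_cons, pvPlaneStep]
    rw [pvRowFold_snd, PySem.List.pySetD_of_nonneg _ _ hj0]
    rw [ih _ _ (by intro j' hj'; rw [List.length_set]; exact hb j' (by simp [hj']))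
          (List.nodup_cons.mp hnd).2]
    by_cases hmr : (m : Int) ∈ rest
    · have hmj : (m : Int) ≠ j := fun h => hjnr (h ▸ hmr)
      obtain ⟨hm0, hml⟩ := hb (m : Int) (by simp [hmr])
      rw [if_pos hmr, if_pos (by simp [hmr])]
      have hg : PySem.List.pyGetD (p.set j.toNat
            (ord3.foldl (pvRowStep padded) (PySem.List.pyGetD p j [], n)).1) (m : Int) []
          = PySem.List.pyGetD p (m : Int) [] := by
        rw [PySem.List.pyGetD_eq_getElem _ _ hm0 (by rw [List.length_set]; omega),
            PySem.List.pyGetD_eq_getElem _ _ hm0 (by omega),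
            List.getElem_set_ne (by omega)]
      rw [hg, List.idxOf_cons_ne _ (by exact fun h => hmj h.symm)]
      have : n + ↑ord3.length + ↑(rest.idxOf (m : Int)) * ↑ord3.length
          = n + (↑(rest.idxOf (m : Int)) + 1) * ↑ord3.length := by ring
      rw [this]
      push_cast; ring_nf
    · by_cases hmj : (m : Int) = j
      · rw [if_neg hmr, if_pos (by simp [hmj])]
        have hm : m = j.toNat := by omega
        subst hm
        rw [List.getElem?_set_self (by omega), hmj, List.idxOf_cons_self]
        simp
      · rw [if_neg hmr, if_neg (by simp [hmj, hmr])]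
        rw [List.getElem?_set_ne (by omega)]

-- element characterization of the grid fold
lemma pv_grid_char (padded : List Char) (ord1 ord2 ord3 : List Int)
    (g : List (List (List String))) (n : Int)
    (hb : ∀ i ∈ ord1, 0 ≤ i ∧ i.toNat < g.length) (hnd : ord1.Nodup) (m : Nat) :
    (ord1.foldl (pvGridStep padded ord2 ord3) (g, n)).1[m]? =
      if (m : Int) ∈ ord1 then
        some (ord2.foldl (pvPlaneStep padded ord3)
          (PySem.List.pyGetD g (m : Int) [],
           n + ord1.idxOf (m : Int) * (ord2.length * ord3.length))).1
      else g[m]? := by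
  induction ord1 generalizing g n with
  | nil => simp
  | cons i rest ih =>
    obtain ⟨hi0, hil⟩ := hb i (by simp)
    have hinr : i ∉ rest := (List.nodup_cons.mp hnd).1
    simp only [List.foldl_cons, pvGridStep]
    rw [pvPlaneFold_snd, PySem.List.pySetD_of_nonneg _ _ hi0]
    rw [ih _ _ (by intro i' hi'; rw [List.length_set]; exact hb i' (by simp [hi']))
          (List.nodup_cons.mp hnd).2]
    by_cases hmr : (m : Int) ∈ rest
    · have hmi : (m : Int) ≠ i := fun h => hinr (h ▸ hmr)
      obtain ⟨hm0, hml⟩ := hb (m : Int) (by simp [hmr])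
      rw [if_pos hmr, if_pos (by simp [hmr])]
      have hg : PySem.List.pyGetD (g.set i.toNat
            (ord2.foldl (pvPlaneStep padded ord3) (PySem.List.pyGetD g i [], n)).1) (m : Int) []
          = PySem.List.pyGetD g (m : Int) [] := by
        rw [PySem.List.pyGetD_eq_getElem _ _ hm0 (by rw [List.length_set]; omega),
            PySem.List.pyGetD_eq_getElem _ _ hm0 (by omega),
            List.getElem_set_ne (by omega)]
      rw [hg, List.idxOf_cons_ne _ (by exact fun h => hmi h.symm)]
      have : n + ↑ord2.length * ↑ord3.length + ↑(rest.idxOf (m : Int)) * (↑ord2.length * ↑ord3.length)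
          = n + (↑(rest.idxOf (m : Int)) + 1) * (↑ord2.length * ↑ord3.length) := by ring
      rw [this]
      push_cast; ring_nf
    · by_cases hmi : (m : Int) = i
      · rw [if_neg hmr, if_pos (by simp [hmi])]
        have hm : m = i.toNat := by omega
        subst hm
        rw [List.getElem?_set_self (by omega), hmi, List.idxOf_cons_self]
        simp
      · rw [if_neg hmr, if_neg (by simp [hmi, hmr])]
        rw [List.getElem?_set_ne (by omega)]

-- the rank-table fold of port B
lemma pv_enum_char (ord : List Int) (r : List Int) (s : Int)
    (hnd : ord.Nodup) (hb : ∀ i ∈ ord, 0 ≤ i ∧ i.toNat < r.length) (m : Nat) :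
    ((PySem.List.enumerate ord s).foldl
        (fun r pi => PySem.List.pySetD r pi.2 pi.1) r)[m]? =
      if (m : Int) ∈ ord then some (s + ord.idxOf (m : Int)) else r[m]? := by
  induction ord generalizing r s with
  | nil => simp
  | cons i rest ih =>
    obtain ⟨hi0, hil⟩ := hb i (by simp)
    have hinr : i ∉ rest := (List.nodup_cons.mp hnd).1
    rw [PySem.List.enumerate_cons]
    simp only [List.foldl_cons]
    rw [PySem.List.pySetD_of_nonneg _ _ hi0]
    rw [ih _ _ (List.nodup_cons.mp hnd).2
          (by intro i' hi'; rw [List.length_set]; exact hb i' (by simp [hi']))]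
    by_cases hmr : (m : Int) ∈ rest
    · have hmi : (m : Int) ≠ i := fun h => hinr (h ▸ hmr)
      rw [if_pos hmr, if_pos (by simp [hmr])]
      rw [List.idxOf_cons_ne _ (by exact fun h => hmi h.symm)]
      push_cast; ring_nf
    · by_cases hmi : (m : Int) = i
      · rw [if_neg hmr, if_pos (by simp [hmi])]
        have hm : m = i.toNat := by omega
        subst hm
        rw [List.getElem?_set_self (by omega), hmi, List.idxOf_cons_self]
        simp
      · rw [if_neg hmr, if_neg (by simp [hmi, hmr])]
        rw [List.getElem?_set_ne (by omega)]

-- keyword_order is a permutation of range(d)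
lemma pv_ko_perm (kv : List Int) (d : Int) :
    (keyword_order kv d).Perm (PySem.List.pyRange 0 d 1) := by
  unfold keyword_order
  have h := (PySem.List.sorted2_perm
      ((PySem.List.pyRange 0 d 1).map
        (fun i => (PySem.List.pyGetD kv (PySem.Int.mod i (kv.length : Int)) 0, i)))
      (fun p => p.1) (fun p => p.2) false).map (fun p : Int × Int => p.2)
  rw [List.map_map] at h
  rw [show ((fun p : Int × Int => p.2) ∘
        fun i => (PySem.List.pyGetD kv (PySem.Int.mod i (kv.length : Int)) 0, i)) = id from rfl,
      List.map_id] at h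
  exact h

lemma pv_ko_nodup (kv : List Int) (d : Int) : (keyword_order kv d).Nodup :=
  (pv_ko_perm kv d).nodup_iff.mpr (PySem.List.nodup_pyRange_one 0 d)

lemma pv_ko_mem (kv : List Int) (d : Int) (x : Int) :
    x ∈ keyword_order kv d ↔ 0 ≤ x ∧ x < d := by
  rw [(pv_ko_perm kv d).mem_iff, PySem.List.mem_pyRange_one]

lemma pv_ko_length (kv : List Int) (d : Int) : (keyword_order kv d).length = d.toNat := by
  rw [(pv_ko_perm kv d).length_eq, PySem.List.length_pyRange_one]
  omega

-- pvRanks entry m is the position of m in the keyword order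
lemma pv_ranks_char (kv : List Int) (d : Int) (m : Nat) (hm : m < d.toNat) :
    (pvRanks kv d)[m]? = some ((keyword_order kv d).idxOf (m : Int) : Int) := by
  unfold pvRanks
  rw [PySem.List.pyRepeat_singleton]
  rw [pv_enum_char _ _ _ (pv_ko_nodup kv d)
        (by
          intro i hi
          rw [List.length_replicate]
          have := (pv_ko_mem kv d i).mp hi
          omega) m]
  rw [if_pos (by rw [pv_ko_mem]; omega)]
  simp

-- ===== VERDICT (by name: the statement is the Claim_ definition above) =====
lemma pv_main (text : String) (d1 d2 d3 : Int) (kv1 kv2 kv3 : List Int) (pad_char : String) :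
    fill_3d_grid_keyword text d1 d2 d3 kv1 kv2 kv3 pad_char
      = fill_3d_grid_keyword_alt text d1 d2 d3 kv1 kv2 kv3 pad_char := by
  simp only [fill_3d_grid_keyword, fill_3d_grid_keyword_alt]
  rw [pv_level1 _ _ _ _ _ _
        (by
          intro i hi
          have := (pv_ko_mem kv1 d1 i).mp hi
          simp only [List.length_map, PySem.List.length_pyRange_one]
          omega)
        (by
          intro p hp j hj
          have := (pv_ko_mem kv2 d2 j).mp hj
          obtain ⟨_, _, rfl⟩ := List.mem_map.mp hp
          simp only [List.length_map, PySem.List.length_pyRange_one]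
          omega)]
  apply List.ext_getElem?
  intro n1
  rw [pv_grid_char _ _ _ _ _ _
        (by
          intro i hi
          have := (pv_ko_mem kv1 d1 i).mp hi
          simp only [List.length_map, PySem.List.length_pyRange_one]
          omega)
        (pv_ko_nodup kv1 d1) n1]
  by_cases hn1 : n1 < d1.toNat
  · rw [if_pos (by rw [pv_ko_mem]; omega), List.getElem?_map]
    have hr1 : (PySem.List.pyRange 0 d1 1)[n1]? = some (0 + (n1 : Int)) := by
      rw [List.getElem?_eq_getElem (by rw [PySem.List.length_pyRange_one]; omega),
          PySem.List.getElem_pyRange_one]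
    rw [hr1, Option.map_some]
    have hg0 : PySem.List.pyGetD
        ((PySem.List.pyRange 0 d1 1).map (fun _ =>
          (PySem.List.pyRange 0 d2 1).map (fun _ =>
            (PySem.List.pyRange 0 d3 1).map (fun _ => (" " : String))))) (n1 : Int)
        ([] : List (List String))
        = (PySem.List.pyRange 0 d2 1).map (fun _ =>
            (PySem.List.pyRange 0 d3 1).map (fun _ => (" " : String))) := by
      rw [PySem.List.pyGetD_eq_getElem _ _ (by omega)
            (by simp only [List.length_map, PySem.List.length_pyRange_one]; omega)]
      rw [List.getElem_map]
    rw [hg0]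
    congr 1
    apply List.ext_getElem?
    intro n2
    rw [pv_plane_char _ _ _ _ _
          (by
            intro j hj
            have := (pv_ko_mem kv2 d2 j).mp hj
            simp only [List.length_map, PySem.List.length_pyRange_one]
            omega)
          (pv_ko_nodup kv2 d2) n2]
    by_cases hn2 : n2 < d2.toNat
    · rw [if_pos (by rw [pv_ko_mem]; omega), List.getElem?_map]
      have hr2 : (PySem.List.pyRange 0 d2 1)[n2]? = some (0 + (n2 : Int)) := by
        rw [List.getElem?_eq_getElem (by rw [PySem.List.length_pyRange_one]; omega),
            PySem.List.getElem_pyRange_one]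
      rw [hr2, Option.map_some]
      have hp0 : PySem.List.pyGetD
          ((PySem.List.pyRange 0 d2 1).map (fun _ =>
            (PySem.List.pyRange 0 d3 1).map (fun _ => (" " : String)))) (n2 : Int)
          ([] : List String)
          = (PySem.List.pyRange 0 d3 1).map (fun _ => (" " : String)) := by
        rw [PySem.List.pyGetD_eq_getElem _ _ (by omega)
              (by simp only [List.length_map, PySem.List.length_pyRange_one]; omega)]
        rw [List.getElem_map]
      rw [hp0]
      congr 1
      apply List.ext_getElem?
      intro n3
      rw [pv_row_char _ _ _ _
            (by
              intro k hk
              have := (pv_ko_mem kv3 d3 k).mp hk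
              simp only [List.length_map, PySem.List.length_pyRange_one]
              omega)
            (pv_ko_nodup kv3 d3) n3]
      by_cases hn3 : n3 < d3.toNat
      · rw [if_pos (by rw [pv_ko_mem]; omega), List.getElem?_map]
        have hr3 : (PySem.List.pyRange 0 d3 1)[n3]? = some (0 + (n3 : Int)) := by
          rw [List.getElem?_eq_getElem (by rw [PySem.List.length_pyRange_one]; omega),
              PySem.List.getElem_pyRange_one]
        rw [hr3, Option.map_some, Option.some_inj]
        have hv1 : PySem.List.pyGetD (pvRanks kv1 d1) (0 + (n1 : Int)) 0
            = ((keyword_order kv1 d1).idxOf (n1 : Int) : Int) := by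
          rw [show (0 + (n1 : Int)) = ((n1 : Nat) : Int) by ring, PySem.List.pyGetD_natCast,
              List.getD_eq_getElem?_getD, pv_ranks_char kv1 d1 n1 hn1, Option.getD_some]
        have hv2 : PySem.List.pyGetD (pvRanks kv2 d2) (0 + (n2 : Int)) 0
            = ((keyword_order kv2 d2).idxOf (n2 : Int) : Int) := by
          rw [show (0 + (n2 : Int)) = ((n2 : Nat) : Int) by ring, PySem.List.pyGetD_natCast,
              List.getD_eq_getElem?_getD, pv_ranks_char kv2 d2 n2 hn2, Option.getD_some]
        have hv3 : PySem.List.pyGetD (pvRanks kv3 d3) (0 + (n3 : Int)) 0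
            = ((keyword_order kv3 d3).idxOf (n3 : Int) : Int) := by
          rw [show (0 + (n3 : Int)) = ((n3 : Nat) : Int) by ring, PySem.List.pyGetD_natCast,
              List.getD_eq_getElem?_getD, pv_ranks_char kv3 d3 n3 hn3, Option.getD_some]
        exact congrArg
          (pvPadAt (text.toList ++
            PySem.List.pyRepeat pad_char.toList (d1 * d2 * d3 - (text.toList.length : Int))))
          (by
            rw [hv1, hv2, hv3, pv_ko_length kv2 d2, pv_ko_length kv3 d3]
            have h2 : ((d2.toNat : Nat) : Int) = d2 := by omega
            have h3 : ((d3.toNat : Nat) : Int) = d3 := by omega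
            rw [h2, h3]
            ring)
      · rw [if_neg (by rw [pv_ko_mem]; omega)]
        rw [List.getElem?_eq_none (by simp only [List.length_map, PySem.List.length_pyRange_one]; omega),
            List.getElem?_eq_none (by simp only [List.length_map, PySem.List.length_pyRange_one]; omega)]
    · rw [if_neg (by rw [pv_ko_mem]; omega)]
      rw [List.getElem?_eq_none (by simp only [List.length_map, PySem.List.length_pyRange_one]; omega),
          List.getElem?_eq_none (by simp only [List.length_map, PySem.List.length_pyRange_one]; omega)]
  · rw [if_neg (by rw [pv_ko_mem]; omega)]
    rw [List.getElem?_eq_none (by simp only [List.length_map, PySem.List.length_pyRange_one]; omega),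
        List.getElem?_eq_none (by simp only [List.length_map, PySem.List.length_pyRange_one]; omega)]

theorem fill_3d_grid_keyword_spec : Claim_equal_fill_3d_grid_keyword := by
  intro text d1 d2 d3 kv1 kv2 kv3 pad_char _hdom _hpre
  exact pv_main text d1 d2 d3 kv1 kv2 kv3 pad_char
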